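-- pv_equiv track=rewrite | github.com/Bafou/SVL | TP1/zorglang.py | zorglang
-- ===== SOURCE A (Python) =====
-- def zorglang(chaine):
-- 	res = ''
-- 	resInter = ''
-- 	for c in chaine:
-- 		if (c.isalpha()):
-- 			resInter = c + resInter
-- 		else:
-- 			res += resInter + c
-- 			resInter = ''
-- 	res += resInter
-- 	return res
-- ===== SOURCE B (Python) =====
-- from itertools import groupby
--
-- def zorglang(chaine):
--     parts = []
--     for is_alpha, group in groupby(chaine, key=str.isalpha):
--         run = ''.join(group)
--         parts.append(run[::-1] if is_alpha else run)
--     return ''.join(parts)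
-- ===== Notes on version B (the rewrite author's own statement) =====
-- stated objective: faster
-- what changed: B splits the string into maximal same-class runs with itertools.groupby and reverses each alphabetic run, joining once, instead of A's single char-by-char pass with quadratic string += accumulation.
import Mathlib
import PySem

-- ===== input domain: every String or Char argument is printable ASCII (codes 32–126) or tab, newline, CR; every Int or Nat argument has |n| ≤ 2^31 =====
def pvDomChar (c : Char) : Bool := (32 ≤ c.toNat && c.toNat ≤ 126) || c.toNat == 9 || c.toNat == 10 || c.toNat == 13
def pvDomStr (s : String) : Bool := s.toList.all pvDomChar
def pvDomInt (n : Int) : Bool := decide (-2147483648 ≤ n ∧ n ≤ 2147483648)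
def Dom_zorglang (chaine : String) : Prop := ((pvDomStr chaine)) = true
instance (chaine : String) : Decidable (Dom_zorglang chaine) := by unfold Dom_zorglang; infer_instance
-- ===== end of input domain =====

-- B groups the string into maximal same-class runs (groupby on isalpha) and reverses the
-- alphabetic runs, instead of A's char-by-char pass with a prepend buffer flushed on separators.

-- ===== PORT A =====
-- A's loop: state (res, resInter); alpha chars are prepended to resInter, a separator
-- flushes res += resInter + c; finally res += resInter.  Strings are carried as List Char.
def zorglang (chaine : String) : String :=
  String.ofList
    ((chaine.toList.foldl
      (fun (st : List Char × List Char) c =>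
        if PySem.Chars.isalpha c then (st.1, c :: st.2) else (st.1 ++ st.2 ++ [c], []))
      ([], [])).1 ++
     (chaine.toList.foldl
      (fun (st : List Char × List Char) c =>
        if PySem.Chars.isalpha c then (st.1, c :: st.2) else (st.1 ++ st.2 ++ [c], []))
      ([], [])).2)

-- ===== PORT B =====
-- groupby(chaine, key=str.isalpha): take the maximal run of chars with the same isalpha
-- value as the head, emit it reversed if alphabetic, as is otherwise, and recurse.
def zorglangAltGo : List Char → List Char
  | [] => []
  | c :: cs =>
    let k := PySem.Chars.isalpha c
    let run := c :: cs.takeWhile (fun d => PySem.Chars.isalpha d == k)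
    let rest := cs.dropWhile (fun d => PySem.Chars.isalpha d == k)
    (if k then run.reverse else run) ++ zorglangAltGo rest
termination_by cs => cs.length
decreasing_by
  simpa using Nat.lt_succ_of_le (List.length_dropWhile_le _ _)

def zorglang_alt (chaine : String) : String :=
  String.ofList (zorglangAltGo chaine.toList)

-- ===== PRECONDITION & SPEC =====
def Spec_zorglang (chaine : String) (out : String) : Prop := out = zorglang_alt chaine
instance (chaine : String) (out : String) : Decidable (Spec_zorglang chaine out) := by unfold Spec_zorglang; infer_instance

-- ===== CLAIM (what is proved, stated in full; the proofs are below) =====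
def Claim_equal_zorglang : Prop := ∀ (chaine : String), Dom_zorglang chaine → Spec_zorglang chaine (zorglang chaine)

-- ===== LEMMAS AND PROOFS =====

-- A's loop, abstracted: buf is the pending alphabetic buffer (in final order).
def zAux : List Char → List Char → List Char
  | buf, [] => buf
  | buf, c :: cs =>
    if PySem.Chars.isalpha c then zAux (c :: buf) cs else buf ++ c :: zAux [] cs

theorem zorglang_foldl_eq (cs : List Char) : ∀ (res buf : List Char),
    (cs.foldl
      (fun (st : List Char × List Char) c =>
        if PySem.Chars.isalpha c then (st.1, c :: st.2) else (st.1 ++ st.2 ++ [c], []))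
      (res, buf)).1 ++
    (cs.foldl
      (fun (st : List Char × List Char) c =>
        if PySem.Chars.isalpha c then (st.1, c :: st.2) else (st.1 ++ st.2 ++ [c], []))
      (res, buf)).2 = res ++ zAux buf cs := by
  induction cs with
  | nil => intro res buf; simp [zAux]
  | cons c cs ih =>
    intro res buf
    rw [List.foldl_cons]
    by_cases h : PySem.Chars.isalpha c = true
    · rw [if_pos h]
      rw [ih]; simp [zAux, h]
    · rw [if_neg h]
      rw [ih]; simp [zAux, h]

theorem zAux_alpha_run (cs : List Char) : ∀ (buf : List Char),
    zAux buf cs =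
      (cs.takeWhile PySem.Chars.isalpha).reverse ++ buf ++
        zAux [] (cs.dropWhile PySem.Chars.isalpha) := by
  induction cs with
  | nil => intro buf; simp [zAux]
  | cons c cs ih =>
    intro buf
    by_cases h : PySem.Chars.isalpha c = true
    · simp [zAux, h, ih (c :: buf)]
    · simp [zAux, h]

theorem zAux_nonalpha_run (cs : List Char) :
    zAux [] cs =
      cs.takeWhile (fun d => !PySem.Chars.isalpha d) ++
        zAux [] (cs.dropWhile (fun d => !PySem.Chars.isalpha d)) := by
  induction cs with
  | nil => simp [zAux]
  | cons c cs ih =>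
    by_cases h : PySem.Chars.isalpha c = true
    · simp [zAux, h]
    · simp [zAux, h, ih]

theorem zAux_eq_altGo (n : ℕ) : ∀ (cs : List Char), cs.length ≤ n →
    zAux [] cs = zorglangAltGo cs := by
  induction n with
  | zero =>
    intro cs hlen
    have : cs = [] := List.eq_nil_of_length_eq_zero (Nat.le_zero.mp hlen)
    subst this; simp [zAux, zorglangAltGo]
  | succ n ih =>
    intro cs hlen
    match cs with
    | [] => simp [zAux, zorglangAltGo]
    | c :: cs =>
      have hlen' : cs.length ≤ n := Nat.lt_succ_iff.mp hlen
      by_cases h : PySem.Chars.isalpha c = true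
      · rw [zorglangAltGo]
        have := zAux_alpha_run cs [c]
        simp only [zAux, h] at *
        rw [this, ih _ (le_trans (List.length_dropWhile_le _ _) hlen')]
        simp
      · rw [zorglangAltGo]
        have hb : PySem.Chars.isalpha c = false := Bool.eq_false_iff.mpr h
        simp only [zAux, h]
        rw [zAux_nonalpha_run cs,
          ih _ (le_trans (List.length_dropWhile_le _ _) hlen')]
        simp

-- ===== VERDICT (by name: the statement is the Claim_ definition above) =====
theorem zorglang_spec : Claim_equal_zorglang := by
  intro chaine _
  unfold Spec_zorglang zorglang zorglang_alt
  rw [zorglang_foldl_eq chaine.toList [] [],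
    zAux_eq_altGo chaine.toList.length chaine.toList le_rfl]
  simp
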